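-- pv_equiv track=rewrite | github.com/mallox-de/rag-poc | rag.py | _build_synonym_lookup
-- ===== SOURCE A (Python) =====
-- def _build_synonym_lookup(syn_map: dict[str, list[str]]) -> dict[str, set[str]]:
--     """
--     Baut ein Lookup, so dass auch das Auftreten eines Synonyms die gesamte Gruppe erweitert.
--     Beispiel:
--       "sso" -> {"single sign-on", "einmalanmeldung"}
--       "single sign-on" -> {"sso", "einmalanmeldung"}
--     """
--     lookup: dict[str, set[str]] = {}
--     for k, syns in syn_map.items():
--         group = {k.lower()} | {s.lower() for s in syns if s}
--         for term in group:
--             others = group - {term}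
--             lookup.setdefault(term, set()).update(others)
--     return lookup
-- ===== SOURCE B (Python) =====
-- def _build_synonym_lookup(syn_map: dict[str, list[str]]) -> dict[str, set[str]]:
--     # Gather formulation via an inverted index: materialise all groups once, index
--     # every term by the list of groups containing it, then emit each term's entry in
--     # a single comprehension as the union of its groups minus the term itself.
--     groups = [{k.lower()} | {s.lower() for s in syns if s} for k, syns in syn_map.items()]
--     owners: dict[str, list[set[str]]] = {}
--     for g in groups:
--         for t in g:
--             owners.setdefault(t, []).append(g)
--     return {t: {u for g in gs for u in g if u != t} for t, gs in owners.items()}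
-- ===== Notes on version B (the rewrite author's own statement) =====
-- stated objective: alternative
-- what changed: A scatters each group into a mutable dict of neighbour sets (setdefault/update with a per-term set subtraction recomputed inside the loop); B transposes this into a gather: it materialises the groups once, builds an inverted index from each term to the list of groups containing it, and then emits every term's entry in one comprehension as the union of its groups minus the term.
import Mathlib
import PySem

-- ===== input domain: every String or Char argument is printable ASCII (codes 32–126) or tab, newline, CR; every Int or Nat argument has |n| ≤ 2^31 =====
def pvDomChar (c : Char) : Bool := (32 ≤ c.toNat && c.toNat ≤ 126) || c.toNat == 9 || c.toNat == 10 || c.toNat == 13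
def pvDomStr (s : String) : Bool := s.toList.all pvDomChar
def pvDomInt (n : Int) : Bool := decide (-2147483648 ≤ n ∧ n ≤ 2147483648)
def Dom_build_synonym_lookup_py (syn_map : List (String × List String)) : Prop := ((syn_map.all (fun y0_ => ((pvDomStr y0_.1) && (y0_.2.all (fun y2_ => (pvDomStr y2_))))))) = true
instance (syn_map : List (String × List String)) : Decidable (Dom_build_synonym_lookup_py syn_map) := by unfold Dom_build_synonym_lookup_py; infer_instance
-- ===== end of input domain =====

-- B transposes A's scatter (group-by-group accumulation into a mutable dict of neighbour
-- sets via setdefault/update with per-term set subtraction) into a gather: it materialises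
-- the groups, builds an inverted index term -> owning groups, and emits each term's entry
-- in one comprehension as the union of its groups minus the term (objective: alternative).
-- The return value is a dict of sets; set/dict iteration order is not part of the claim.

-- ===== PORT A =====
-- shared helper: the group expression {k.lower()} | {s.lower() for s in syns if s},
-- which appears verbatim in both Pythons
def pvGroup (kv : String × List String) : PySem.Set String :=
  PySem.Set.union (PySem.Set.ofList [PySem.Str.lower kv.1])
    (PySem.Set.ofList ((kv.2.filter (fun s => s != "")).map PySem.Str.lower))

def build_synonym_lookup_py (syn_map : List (String × List String)) : List (String × List String) :=
  (syn_map.foldl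
    (fun lookup kv =>
      let group := pvGroup kv
      -- for term in group: lookup.setdefault(term, set()).update(group - {term})
      group.foldl
        (fun lookup term =>
          lookup.modify term PySem.Set.empty
            (fun s => PySem.Set.update s (PySem.Set.diff group (PySem.Set.ofList [term]))))
        lookup)
    (PySem.Dict.empty : PySem.Dict String (PySem.Set String))).items

-- ===== PORT B =====
def build_synonym_lookup_py_alt (syn_map : List (String × List String)) : List (String × List String) :=
  -- groups = [{k.lower()} | {s.lower() for s in syns if s} for k, syns in syn_map.items()]
  let groups := syn_map.map pvGroup
  -- owners = {}; for g in groups: for t in g: owners.setdefault(t, []).append(g)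
  let owners : PySem.Dict String (List (PySem.Set String)) :=
    groups.foldl
      (fun owners g =>
        g.foldl (fun owners t => owners.modify t [] (fun gs => gs ++ [g])) owners)
      PySem.Dict.empty
  -- {t: {u for g in gs for u in g if u != t} for t, gs in owners.items()}
  owners.items.map (fun p =>
    (p.1, PySem.Set.ofList (p.2.flatMap (fun g => g.filter (fun u => u != p.1)))))

-- ===== PRECONDITION & SPEC =====
def Spec_build_synonym_lookup_py (syn_map : List (String × List String)) (out : List (String × List String)) : Prop := out = build_synonym_lookup_py_alt syn_map
instance (syn_map : List (String × List String)) (out : List (String × List String)) : Decidable (Spec_build_synonym_lookup_py syn_map out) := by unfold Spec_build_synonym_lookup_py; infer_instance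

-- ===== CLAIM (what is proved, stated in full; the proofs are below) =====
def Claim_equal_build_synonym_lookup_py : Prop := ∀ (syn_map : List (String × List String)), Dom_build_synonym_lookup_py syn_map → Spec_build_synonym_lookup_py syn_map (build_synonym_lookup_py syn_map)

-- ===== LEMMAS AND PROOFS =====

-- Both ports run the same loop shape: a fold over groups that, for each term t of the
-- group g, does  d.modify t dflt (step g t).  The generic lemmas below characterise such
-- a loop by a value function V on the list of groups processed so far; they are then
-- instantiated with V := accumulated neighbour sets (port A) and V := inverted index
-- (port B's owners dict).

-- the table such a loop builds: one entry per distinct term, in first-encounter order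
def pvTab {ν : Type} (V : List (PySem.Set String) → String → ν)
    (ps : List (PySem.Set String)) : List (String × ν) :=
  (PySem.Set.ofList ps.flatten).map (fun t => (t, V ps t))

-- the dict while scattering group g after the groups ps, prefix `done` of g processed
def pvH {ν : Type} (V : List (PySem.Set String) → String → ν)
    (step : PySem.Set String → String → ν → ν)
    (ps : List (PySem.Set String)) (g : PySem.Set String) (done : List String) :
    List (String × ν) :=
  (PySem.Set.update (PySem.Set.ofList ps.flatten) done).map
    (fun t => (t, if t ∈ done then step g t (V ps t) else V ps t))

lemma pv_get?_mk_map {ν : Type} (K : List String) (val : String → ν) (x : String) :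
    (PySem.Dict.mk (K.map (fun t => (t, val t)))).get? x
      = if x ∈ K then some (val x) else none := by
  induction K with
  | nil => rfl
  | cons k K ih =>
    simp only [List.map_cons, PySem.Dict.get?_mk_cons, ih]
    by_cases h : k = x
    · subst h; simp
    · have hb : (k == x) = false := by simp [h]
      simp [hb, Ne.symm h]

lemma pv_step {ν : Type} (V : List (PySem.Set String) → String → ν)
    (step : PySem.Set String → String → ν → ν) (dflt : ν)
    (hV0 : ∀ ps t, t ∉ ps.flatten → V ps t = dflt)
    (ps : List (PySem.Set String)) (g : PySem.Set String) (done : List String)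
    (t : String) (ht : t ∉ done) :
    (PySem.Dict.mk (pvH V step ps g done)).modify t dflt (step g t)
      = PySem.Dict.mk (pvH V step ps g (done ++ [t])) := by
  have hkeys : PySem.Set.update (PySem.Set.ofList ps.flatten) (done ++ [t])
      = PySem.Set.add (PySem.Set.update (PySem.Set.ofList ps.flatten) done) t := by
    rw [PySem.Set.update_append]; rfl
  have hget := pv_get?_mk_map
    (PySem.Set.update (PySem.Set.ofList ps.flatten) done)
    (fun u => if u ∈ done then step g u (V ps u) else V ps u) t
  by_cases hK : t ∈ PySem.Set.update (PySem.Set.ofList ps.flatten) done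
  · -- t is already a key: modify rewrites its value in place
    have hgets : (PySem.Dict.mk (pvH V step ps g done)).get? t = some (V ps t) := by
      simp only [pvH]
      rw [hget]
      simp [hK, ht]
    have hc : (PySem.Dict.mk (pvH V step ps g done)).contains t = true := by
      rw [PySem.Dict.contains_eq_isSome_get?, hgets]; rfl
    apply PySem.Dict.ext
    simp only [PySem.Dict.modify, PySem.Dict.getD]
    rw [hgets, PySem.Dict.items_insert_of_contains _ _ hc]
    show List.map _ (pvH V step ps g done) = pvH V step ps g (done ++ [t])
    unfold pvH
    rw [hkeys, PySem.Set.add_of_mem hK, List.map_map]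
    apply List.map_congr_left
    intro u _
    by_cases hu : u = t
    · subst hu
      simp [Function.comp, ht]
    · have hb : (u == t) = false := by simp [hu]
      simp [Function.comp, hb, List.mem_append, hu]
  · -- t is a new key: modify appends (t, step g t dflt)
    have hmem : t ∉ ps.flatten := fun hm =>
      hK (by simpa [PySem.Set.mem_update, PySem.Set.mem_ofList] using Or.inl hm)
    have hgets : (PySem.Dict.mk (pvH V step ps g done)).get? t = none := by
      simp only [pvH]
      rw [hget]
      simp [hK]
    have hc : (PySem.Dict.mk (pvH V step ps g done)).contains t = false := by
      rw [PySem.Dict.contains_eq_isSome_get?, hgets]; rfl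
    apply PySem.Dict.ext
    simp only [PySem.Dict.modify, PySem.Dict.getD]
    rw [hgets, PySem.Dict.items_insert_of_not_contains _ _ hc]
    show pvH V step ps g done ++ [(t, _)] = pvH V step ps g (done ++ [t])
    unfold pvH
    rw [hkeys, PySem.Set.add_of_not_mem hK, List.map_append]
    congr 1
    · apply List.map_congr_left
      intro u hu
      have hut : u ≠ t := fun h => hK (h ▸ hu)
      simp [List.mem_append, hut]
    · simp [hV0 ps t hmem]

lemma pv_inner {ν : Type} (V : List (PySem.Set String) → String → ν)
    (step : PySem.Set String → String → ν → ν) (dflt : ν)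
    (hV0 : ∀ ps t, t ∉ ps.flatten → V ps t = dflt)
    (ps : List (PySem.Set String)) (g : PySem.Set String) :
    ∀ (rest done : List String), (∀ u ∈ rest, u ∉ done) → rest.Nodup →
    rest.foldl (fun d term => d.modify term dflt (step g term))
        (PySem.Dict.mk (pvH V step ps g done))
      = PySem.Dict.mk (pvH V step ps g (done ++ rest)) := by
  intro rest
  induction rest with
  | nil => intro done _ _; simp
  | cons t rest ih =>
    intro done hfresh hnd
    simp only [List.foldl_cons]
    rw [pv_step V step dflt hV0 ps g done t (hfresh t (by simp))]
    rw [ih (done ++ [t])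
        (fun u hu => by
          have h1 : u ∉ done := hfresh u (by simp [hu])
          have h2 : u ≠ t := fun h => ((List.nodup_cons.mp hnd).1 (h ▸ hu))
          simp [List.mem_append, h1, h2])
        (List.nodup_cons.mp hnd).2]
    simp

lemma pv_H_nil {ν : Type} (V : List (PySem.Set String) → String → ν)
    (step : PySem.Set String → String → ν → ν)
    (ps : List (PySem.Set String)) (g : PySem.Set String) :
    pvH V step ps g [] = pvTab V ps := by
  unfold pvH pvTab
  rw [PySem.Set.update_nil]
  simp

lemma pv_H_full {ν : Type} (V : List (PySem.Set String) → String → ν)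
    (step : PySem.Set String → String → ν → ν)
    (hVstep : ∀ ps g t, V (ps ++ [g]) t = if t ∈ g then step g t (V ps t) else V ps t)
    (ps : List (PySem.Set String)) (g : PySem.Set String) :
    pvH V step ps g g = pvTab V (ps ++ [g]) := by
  unfold pvH pvTab
  have hkeys : PySem.Set.ofList (ps ++ [g]).flatten
      = PySem.Set.update (PySem.Set.ofList ps.flatten) g := by
    rw [List.flatten_append, PySem.Set.ofList_append]
    simp
  rw [hkeys]
  apply List.map_congr_left
  intro t _
  rw [hVstep ps g t]

lemma pv_scatter {ν : Type} (V : List (PySem.Set String) → String → ν)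
    (step : PySem.Set String → String → ν → ν) (dflt : ν)
    (hV0 : ∀ ps t, t ∉ ps.flatten → V ps t = dflt)
    (hVstep : ∀ ps g t, V (ps ++ [g]) t = if t ∈ g then step g t (V ps t) else V ps t)
    (ps : List (PySem.Set String)) (g : PySem.Set String) (hg : g.Nodup) :
    g.foldl (fun d term => d.modify term dflt (step g term)) (PySem.Dict.mk (pvTab V ps))
      = PySem.Dict.mk (pvTab V (ps ++ [g])) := by
  rw [← pv_H_nil V step ps g, pv_inner V step dflt hV0 ps g g [] (by simp) hg]
  rw [show ([] : List String) ++ g = g from rfl, pv_H_full V step hVstep]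

lemma pv_group_nodup (kv : String × List String) : (pvGroup kv).Nodup := by
  unfold pvGroup
  exact PySem.Set.nodup_union _ _ (PySem.Set.nodup_ofList _)

lemma pv_outer {α ν : Type} (grp : α → PySem.Set String)
    (V : List (PySem.Set String) → String → ν)
    (step : PySem.Set String → String → ν → ν) (dflt : ν)
    (hV0 : ∀ ps t, t ∉ ps.flatten → V ps t = dflt)
    (hVstep : ∀ ps g t, V (ps ++ [g]) t = if t ∈ g then step g t (V ps t) else V ps t) :
    ∀ (l : List α), (∀ a ∈ l, (grp a).Nodup) → ∀ (ps : List (PySem.Set String)),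
    l.foldl
        (fun d a => (grp a).foldl
          (fun d term => d.modify term dflt (step (grp a) term)) d)
        (PySem.Dict.mk (pvTab V ps))
      = PySem.Dict.mk (pvTab V (ps ++ l.map grp)) := by
  intro l
  induction l with
  | nil => intro _ ps; simp
  | cons a rest ih =>
    intro hgrp ps
    simp only [List.foldl_cons]
    rw [pv_scatter V step dflt hV0 hVstep ps (grp a) (hgrp a (by simp))]
    rw [ih (fun b hb => hgrp b (by simp [hb])) (ps ++ [grp a])]
    simp

-- instantiation for port A: V = accumulated neighbour sets
def pvVals (ps : List (PySem.Set String)) (t : String) : PySem.Set String :=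
  PySem.Set.ofList
    ((ps.filter (fun g => PySem.Set.contains g t)).flatMap
      (fun g => g.filter (fun u => u != t)))

lemma pv_owners_nil (ps : List (PySem.Set String)) (t : String) (h : t ∉ ps.flatten) :
    ps.filter (fun g => PySem.Set.contains g t) = [] := by
  rw [List.filter_eq_nil_iff]
  intro g hg
  have : t ∉ g := fun hm => h (List.mem_flatten.mpr ⟨g, hg, hm⟩)
  simpa [PySem.Set.contains_iff] using this

lemma pv_owners_step (ps : List (PySem.Set String)) (g : PySem.Set String) (t : String) :
    (ps ++ [g]).filter (fun g' => PySem.Set.contains g' t)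
      = if t ∈ g
        then ps.filter (fun g' => PySem.Set.contains g' t) ++ [g]
        else ps.filter (fun g' => PySem.Set.contains g' t) := by
  rw [List.filter_append]
  by_cases hg : t ∈ g
  · have : [g].filter (fun g' => PySem.Set.contains g' t) = [g] := by simp [hg]
    rw [this, if_pos hg]
  · have : [g].filter (fun g' => PySem.Set.contains g' t) = [] := by simp [hg]
    rw [this, if_neg hg, List.append_nil]

lemma pv_diff_single (g : PySem.Set String) (t : String) :
    PySem.Set.diff g (PySem.Set.ofList [t]) = g.filter (fun u => u != t) := by
  simp only [PySem.Set.diff]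
  apply List.filter_congr
  intro u _
  by_cases h : u = t <;> simp [PySem.Set.ofList, h]

lemma pv_vals_nil (ps : List (PySem.Set String)) (t : String) (h : t ∉ ps.flatten) :
    pvVals ps t = PySem.Set.empty := by
  unfold pvVals
  rw [pv_owners_nil ps t h]
  rfl

lemma pv_vals_step (ps : List (PySem.Set String)) (g : PySem.Set String) (t : String) :
    pvVals (ps ++ [g]) t
      = if t ∈ g
        then PySem.Set.update (pvVals ps t) (PySem.Set.diff g (PySem.Set.ofList [t]))
        else pvVals ps t := by
  unfold pvVals
  rw [pv_owners_step, pv_diff_single]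
  by_cases hg : t ∈ g
  · rw [if_pos hg, if_pos hg, List.flatMap_append, PySem.Set.ofList_append]
    simp
  · rw [if_neg hg, if_neg hg]

lemma pv_owners_nodup (syn_map : List (String × List String)) :
    ∀ a ∈ syn_map.map pvGroup, ((fun g : PySem.Set String => g) a).Nodup := by
  intro a ha
  obtain ⟨kv, _, rfl⟩ := List.mem_map.mp ha
  exact pv_group_nodup kv

-- B's final comprehension over the owners dict, as a function on item lists
def pvFinal (l : List (String × List (PySem.Set String))) : List (String × List String) :=
  l.map (fun p => (p.1, PySem.Set.ofList (p.2.flatMap (fun g => g.filter (fun u => u != p.1)))))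

-- ===== VERDICT (by name: the statement is the Claim_ definition above) =====
theorem build_synonym_lookup_py_spec : Claim_equal_build_synonym_lookup_py := by
  intro syn_map _
  unfold Spec_build_synonym_lookup_py
  have hA := pv_outer pvGroup pvVals
    (fun g t s => PySem.Set.update s (PySem.Set.diff g (PySem.Set.ofList [t])))
    PySem.Set.empty pv_vals_nil pv_vals_step syn_map (fun a _ => pv_group_nodup a) []
  have hB := pv_outer (fun g : PySem.Set String => g)
    (fun ps t => ps.filter (fun g => PySem.Set.contains g t))
    (fun g _ gs => gs ++ [g]) [] pv_owners_nil pv_owners_step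
    (syn_map.map pvGroup) (pv_owners_nodup syn_map) []
  rw [List.map_id'] at hB
  have e1 : build_synonym_lookup_py syn_map = pvTab pvVals (syn_map.map pvGroup) :=
    congrArg PySem.Dict.items hA
  have e2 : build_synonym_lookup_py_alt syn_map
      = pvFinal (pvTab (fun ps t => ps.filter (fun g => PySem.Set.contains g t))
          (syn_map.map pvGroup)) :=
    congrArg (fun d : PySem.Dict String (List (PySem.Set String)) => pvFinal d.items) hB
  rw [e1, e2]
  unfold pvFinal pvTab
  rw [List.map_map]
  rfl
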